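-- pv_equiv track=rewrite | github.com/mohamadnachabe/calculator | calculator/calculator.py | parse_numbers
-- ===== SOURCE A (Python) =====
-- def parse_numbers(o):
--     result = []
--     while len(o) != 0:
--         n = ''
--         if o[0] == ' ':
--             o = o[1:]
--             continue
--
--         while len(o) != 0 and o[0].isdigit():
--             n = n + o[0]
--             o = o[1:]
--         if len(o) != 0:
--             o = o[1:]
--
--         if n.isdigit():
--             result.append(n)
--
--     return result
-- ===== SOURCE B (Python) =====
-- def parse_numbers(o):
--     # One pass over the characters with a pending-run accumulator:
--     # flush the run of digits whenever a non-digit appears (and at the end).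
--     result = []
--     run = []
--     for ch in o:
--         if ch.isdigit():
--             run.append(ch)
--         elif run:
--             result.append(''.join(run))
--             run = []
--     if run:
--         result.append(''.join(run))
--     return result
-- ===== Notes on version B (the rewrite author's own statement) =====
-- stated objective: faster
-- what changed: A repeatedly re-slices the string head (o = o[1:]) in nested while loops, O(n^2); B makes one left-to-right pass accumulating the current digit run and flushing it at each non-digit and at the end.
import Mathlib
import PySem

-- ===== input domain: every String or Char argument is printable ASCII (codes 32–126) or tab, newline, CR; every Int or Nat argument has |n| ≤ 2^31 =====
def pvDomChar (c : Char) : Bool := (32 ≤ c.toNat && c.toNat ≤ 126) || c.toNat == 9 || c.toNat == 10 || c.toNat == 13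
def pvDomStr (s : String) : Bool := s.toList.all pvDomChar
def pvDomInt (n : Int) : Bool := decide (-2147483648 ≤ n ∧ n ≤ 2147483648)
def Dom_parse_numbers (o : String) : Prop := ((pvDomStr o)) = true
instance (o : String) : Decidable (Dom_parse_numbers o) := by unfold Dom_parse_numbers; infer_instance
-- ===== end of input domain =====

-- B replaces A's quadratic repeated head-slicing with one left-to-right pass
-- that accumulates the current digit run and flushes it at each non-digit.

-- ===== PORT A =====
-- inner while: consumes leading digits of o, appending them to n
def pvInnerA (n : List Char) (o : List Char) : List Char × List Char :=
  match o with
  | [] => (n, [])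
  | c :: rest =>
      if PySem.Chars.isdigit c then pvInnerA (n ++ [c]) rest else (n, c :: rest)

lemma pvInnerA_len (o : List Char) : ∀ n, (pvInnerA n o).2.length ≤ o.length := by
  induction o with
  | nil => intro n; simp [pvInnerA]
  | cons c rest ih =>
      intro n
      by_cases h : PySem.Chars.isdigit c
      · simpa [pvInnerA, h] using Nat.le_succ_of_le (ih (n ++ [c]))
      · simp [pvInnerA, h]

-- outer while loop of A, on the character list of o
def pvLoopA (o : List Char) : List String :=
  match o with
  | [] => []
  | c :: rest =>
      if c = ' ' then pvLoopA rest
      else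
        let p := pvInnerA [] (c :: rest)
        let o' := if p.2.length ≠ 0 then p.2.drop 1 else p.2
        (if PySem.Chars.strIsdigit p.1 then [String.ofList p.1] else []) ++ pvLoopA o'
termination_by o.length
decreasing_by
  · simp
  · by_cases h : PySem.Chars.isdigit c
    · have h1 : (pvInnerA [] (c :: rest)).2.length ≤ rest.length := by
        simpa [pvInnerA, h] using pvInnerA_len rest [c]
      split <;> simp <;> omega
    · simp [pvInnerA, h]

def parse_numbers (o : String) : List String := pvLoopA o.toList

-- ===== PORT B =====
def pvStepB (st : List String × List Char) (ch : Char) : List String × List Char :=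
  if PySem.Chars.isdigit ch then (st.1, st.2 ++ [ch])
  else if st.2 ≠ [] then (st.1 ++ [String.ofList st.2], [])
  else st

def parse_numbers_alt (o : String) : List String :=
  let st := o.toList.foldl pvStepB ([], [])
  if st.2 ≠ [] then st.1 ++ [String.ofList st.2] else st.1

-- ===== PRECONDITION & SPEC =====
def Spec_parse_numbers (o : String) (out : List String) : Prop := out = parse_numbers_alt o
instance (o : String) (out : List String) : Decidable (Spec_parse_numbers o out) := by unfold Spec_parse_numbers; infer_instance

-- ===== CLAIM (what is proved, stated in full; the proofs are below) =====
def Claim_equal_parse_numbers : Prop := ∀ (o : String), Dom_parse_numbers o → Spec_parse_numbers o (parse_numbers o)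

-- ===== LEMMAS AND PROOFS =====
-- canonical "pending run" recursion both ports reduce to
def pvG (run : List Char) (o : List Char) : List String :=
  match o with
  | [] => if run ≠ [] then [String.ofList run] else []
  | c :: rest =>
      if PySem.Chars.isdigit c then pvG (run ++ [c]) rest
      else if run ≠ [] then String.ofList run :: pvG [] rest
      else pvG [] rest

lemma foldB_eq_pvG (l : List Char) : ∀ acc run,
    (let st := l.foldl pvStepB (acc, run)
     if st.2 ≠ [] then st.1 ++ [String.ofList st.2] else st.1) = acc ++ pvG run l := by
  induction l with
  | nil =>
      intro acc run
      by_cases h : run = [] <;> simp [pvG, h]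
  | cons c rest ih =>
      intro acc run
      by_cases h : PySem.Chars.isdigit c
      · simpa [pvStepB, h, pvG] using ih acc (run ++ [c])
      · by_cases hr : run = []
        · simpa [pvStepB, h, hr, pvG] using ih acc []
        · simpa [pvStepB, h, hr, pvG] using ih (acc ++ [String.ofList run]) []

lemma pvInnerA_eq (o : List Char) : ∀ n,
    pvInnerA n o = (n ++ o.takeWhile PySem.Chars.isdigit, o.dropWhile PySem.Chars.isdigit) := by
  induction o with
  | nil => intro n; simp [pvInnerA]
  | cons c rest ih =>
      intro n
      by_cases h : PySem.Chars.isdigit c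
      · simp [pvInnerA, h, ih]
      · simp [pvInnerA, h]

lemma pvG_run (o : List Char) : ∀ run, run ≠ [] →
    pvG run o = String.ofList (run ++ o.takeWhile PySem.Chars.isdigit)
      :: pvG [] ((o.dropWhile PySem.Chars.isdigit).drop 1) := by
  induction o with
  | nil => intro run h; simp [pvG, h]
  | cons c rest ih =>
      intro run h
      by_cases hd : PySem.Chars.isdigit c
      · simp [pvG, hd, ih (run ++ [c]) (by simp)]
      · simp [pvG, hd, h]

lemma strIsdigit_digits (l : List Char) (h : l ≠ []) (ha : ∀ c ∈ l, PySem.Chars.isdigit c = true) :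
    PySem.Chars.strIsdigit l = true := by
  simp [PySem.Chars.strIsdigit, h, List.all_eq_true]
  exact ha

lemma loopA_eq_pvG : ∀ (k : Nat) (l : List Char), l.length ≤ k → pvLoopA l = pvG [] l := by
  intro k
  induction k with
  | zero =>
      intro l h
      have : l = [] := List.eq_nil_of_length_eq_zero (Nat.le_zero.mp h)
      simp [this, pvLoopA, pvG]
  | succ k ih =>
      intro l h
      match l with
      | [] => simp [pvLoopA, pvG]
      | c :: rest =>
        have hr : rest.length ≤ k := by simpa using h
        by_cases hsp : c = ' '
        · have hd : PySem.Chars.isdigit c = false := by subst hsp; decide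
          rw [pvLoopA, if_pos hsp, pvG, ih rest hr]
          simp [hd]
        · rw [pvLoopA, if_neg hsp]
          by_cases hd : PySem.Chars.isdigit c
          · have hrun : PySem.Chars.strIsdigit (c :: rest.takeWhile PySem.Chars.isdigit) = true := by
              apply strIsdigit_digits _ (by simp)
              intro x hx
              rcases List.mem_cons.mp hx with h1 | h1
              · exact h1 ▸ hd
              · exact List.mem_takeWhile_imp h1
            have hlen : ((rest.dropWhile PySem.Chars.isdigit).drop 1).length ≤ k := by
              have h1 := List.length_dropWhile_le (p := PySem.Chars.isdigit) (l := rest)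
              simp only [List.length_drop]
              omega
            have hdropeq : (if ((c :: rest).dropWhile PySem.Chars.isdigit).length ≠ 0
                  then ((c :: rest).dropWhile PySem.Chars.isdigit).drop 1
                  else (c :: rest).dropWhile PySem.Chars.isdigit)
                = (rest.dropWhile PySem.Chars.isdigit).drop 1 := by
              rw [List.dropWhile_cons_of_pos hd]
              split
              · rfl
              · next hnz =>
                  have h0 : (rest.dropWhile PySem.Chars.isdigit).length = 0 := by omega
                  simp [List.eq_nil_of_length_eq_zero h0]
            simp only [pvInnerA_eq, List.takeWhile_cons_of_pos hd, List.dropWhile_cons_of_pos hd,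
              List.nil_append] at *
            rw [hdropeq, ih _ hlen, hrun]
            rw [pvG, if_pos hd, pvG_run rest ([] ++ [c]) (by simp)]
            simp
          · -- non-digit, non-space head: skipped, n = '' is not a digit string
            have hz : PySem.Chars.strIsdigit ([] : List Char) = false := by decide
            simp only [pvInnerA_eq, List.takeWhile_cons_of_neg hd, List.dropWhile_cons_of_neg hd]
            simp [hz, pvG, hd, ih rest hr]

-- ===== VERDICT (by name: the statement is the Claim_ definition above) =====
theorem parse_numbers_spec : Claim_equal_parse_numbers := by
  intro o _
  unfold Spec_parse_numbers parse_numbers parse_numbers_alt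
  rw [foldB_eq_pvG, loopA_eq_pvG o.toList.length o.toList le_rfl]
  simp
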